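-- pv_equiv track=rewrite | github.com/plantdna/pedify | common/derived_pedigree_strucutal_analysis.py | get_certain_source
-- ===== SOURCE A (Python) =====
-- def get_certain_source(data):
--     s = list(set([v for v in data if v != '']))
--     if len(s) == 1:
--         return s[0]
--     elif len(s) == 0:
--         return 'Unknow'
--     else:
--         return ''
-- ===== SOURCE B (Python) =====
-- def get_certain_source(data):
--     candidate = None
--     multiple = False
--     for v in data:
--         if v != '':
--             if candidate is None:
--                 candidate = v
--             elif v != candidate:
--                 multiple = True
--     if multiple:
--         return ''
--     if candidate is None:
--         return 'Unknow'
--     return candidate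
-- ===== Notes on version B (the rewrite author's own statement) =====
-- stated objective: alternative
-- what changed: One pass maintaining two scalars (first non-empty value seen, a multiple-values flag) instead of building a deduplicated set of the non-empty values and branching on its size.
import Mathlib
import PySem

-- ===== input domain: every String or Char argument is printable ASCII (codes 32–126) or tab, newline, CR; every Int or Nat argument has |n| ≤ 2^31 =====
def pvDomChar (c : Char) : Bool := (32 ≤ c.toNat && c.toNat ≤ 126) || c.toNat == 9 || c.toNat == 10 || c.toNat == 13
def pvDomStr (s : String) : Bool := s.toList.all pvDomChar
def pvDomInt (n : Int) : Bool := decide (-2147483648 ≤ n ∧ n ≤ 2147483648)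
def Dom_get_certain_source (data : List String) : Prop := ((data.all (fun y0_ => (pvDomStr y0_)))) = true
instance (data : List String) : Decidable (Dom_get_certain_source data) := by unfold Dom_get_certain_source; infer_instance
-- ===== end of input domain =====

-- B replaces A's "deduplicate then branch on set size" with a single pass keeping two
-- scalars (first non-empty value, a multiplicity flag); objective: alternative decomposition.
-- A reads s[0] only when len(s) == 1, so the unmodelled iteration order of Python's set is irrelevant.

-- ===== PORT A =====
def get_certain_source (data : List String) : String :=
  let s : PySem.Set String := PySem.Set.ofList (data.filter (fun v => v ≠ ""))
  if s.length = 1 then s.headD ""      -- s[0]; safe since len(s) = 1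
  else if s.length = 0 then "Unknow"
  else ""

-- ===== PORT B =====
def get_certain_source_alt (data : List String) : String :=
  let st := data.foldl
    (fun (acc : Option String × Bool) v =>
      if v = "" then acc
      else
        match acc.1 with
        | none => (some v, acc.2)
        | some c => (some c, acc.2 || decide (v ≠ c)))
    (none, false)
  if st.2 then ""
  else
    match st.1 with
    | none => "Unknow"
    | some c => c

-- ===== PRECONDITION & SPEC =====
def Spec_get_certain_source (data : List String) (out : String) : Prop := out = get_certain_source_alt data
instance (data : List String) (out : String) : Decidable (Spec_get_certain_source data out) := by unfold Spec_get_certain_source; infer_instance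

-- ===== CLAIM (what is proved, stated in full; the proofs are below) =====
def Claim_equal_get_certain_source : Prop := ∀ (data : List String), Dom_get_certain_source data → Spec_get_certain_source data (get_certain_source data)

-- ===== LEMMAS AND PROOFS =====

-- the B-fold state corresponding to an accumulated set
def pvStateOf (s : List String) : Option String × Bool := (s.head?, decide (2 ≤ s.length))

def pvStep (acc : Option String × Bool) (v : String) : Option String × Bool :=
  match acc.1 with
  | none => (some v, acc.2)
  | some c => (some c, acc.2 || decide (v ≠ c))

theorem pvStep_add (s : List String) (v : String) :
    pvStep (pvStateOf s) v = pvStateOf (PySem.Set.add s v) := by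
  cases s with
  | nil => simp [pvStep, pvStateOf, PySem.Set.add, PySem.Set.contains]
  | cons c rest =>
    by_cases hv : (c :: rest).contains v
    · have hmem : v ∈ c :: rest := by simpa using hv
      simp only [pvStep, pvStateOf, PySem.Set.add, PySem.Set.contains, hv, if_pos]
      by_cases hvc : v = c
      · simp [hvc]
      · have hvr : v ∈ rest := by
          rcases List.mem_cons.mp hmem with h | h
          · exact absurd h hvc
          · exact h
        have hr : 1 ≤ rest.length := by
          cases rest with
          | nil => simp at hvr
          | cons _ _ => simp
        simp only [List.length_cons]
        simp
        omega
    · have hvc : v ≠ c := by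
        intro h; exact hv (by simp [h])
      have hvr : v ∉ rest := by
        intro h; simp at hv; exact absurd (Or.inr h) (by simpa using hv)
      simp only [pvStep, pvStateOf, PySem.Set.add, PySem.Set.contains, hv,
        Bool.false_eq_true, if_neg, not_false_iff]
      simp [hvc]

theorem pvFold_update (ys : List String) (s : List String) :
    ys.foldl pvStep (pvStateOf s) = pvStateOf (ys.foldl PySem.Set.add s) := by
  induction ys generalizing s with
  | nil => rfl
  | cons y ys ih => simp only [List.foldl_cons, pvStep_add]; exact ih _

theorem pvFold_state (ys : List String) :
    ys.foldl pvStep (none, false) = pvStateOf (PySem.Set.ofList ys) := by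
  have h0 : pvStateOf ([] : List String) = (none, false) := rfl
  rw [← h0, pvFold_update]
  rfl

-- ===== VERDICT (by name: the statement is the Claim_ definition above) =====
theorem get_certain_source_spec : Claim_equal_get_certain_source := by
  intro data _
  show get_certain_source data = get_certain_source_alt data
  unfold get_certain_source get_certain_source_alt
  have hbody : (fun (acc : Option String × Bool) v =>
      if v = "" then acc
      else
        match acc.1 with
        | none => (some v, acc.2)
        | some c => (some c, acc.2 || decide (v ≠ c)))
      = (fun acc v => if (decide (v ≠ "")) = true then pvStep acc v else acc) := by
    funext acc v
    by_cases hv : v = "" <;> simp [pvStep, hv]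
  have hfold : data.foldl
      (fun (acc : Option String × Bool) v =>
        if v = "" then acc
        else
          match acc.1 with
          | none => (some v, acc.2)
          | some c => (some c, acc.2 || decide (v ≠ c)))
      (none, false)
      = (data.filter (fun v => v ≠ "")).foldl pvStep (none, false) := by
    rw [List.foldl_filter, hbody]
  rw [hfold, pvFold_state]
  cases hs : PySem.Set.ofList (data.filter (fun v => v ≠ "")) with
  | nil => simp [pvStateOf]
  | cons c rest =>
    cases rest with
    | nil => simp [pvStateOf]
    | cons d rest' => simp [pvStateOf]
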